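-- pv_equiv track=rewrite | github.com/ml-thesis/meta-fsl-nas | metanas/metanas/utils/genotypes.py | get_edge_indices
-- ===== SOURCE A (Python) =====
-- def get_edge_indices(nodes=3):
--     # Amount of nodes for each edge
--     j = [i for i in range(2, nodes+2)]
--
--     prev = 0
--     indices = []
--     for i in j:
--         if prev != 0:
--             indices.append((sum(j[:j.index(prev)+1]),
--                             sum(j[:j.index(i)+1])))
--         else:
--             indices.append((0, sum(j[:j.index(i)+1])))
--         prev = i
--     return indices
-- ===== SOURCE B (Python) =====
-- def get_edge_indices(nodes=3):
--     # Single pass with a running prefix sum: node k (k = 2 .. nodes+1) has k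
--     # incoming edges; emit (acc, acc + k) and advance acc.
--     indices = []
--     acc = 0
--     for k in range(2, nodes + 2):
--         indices.append((acc, acc + k))
--         acc += k
--     return indices
-- ===== Notes on version B (the rewrite author's own statement) =====
-- stated objective: faster
-- what changed: Replaced the quadratic loop that re-finds each element with list.index and re-sums a growing slice by a single pass that keeps a running prefix sum and emits (acc, acc+k) directly.
import Mathlib
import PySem

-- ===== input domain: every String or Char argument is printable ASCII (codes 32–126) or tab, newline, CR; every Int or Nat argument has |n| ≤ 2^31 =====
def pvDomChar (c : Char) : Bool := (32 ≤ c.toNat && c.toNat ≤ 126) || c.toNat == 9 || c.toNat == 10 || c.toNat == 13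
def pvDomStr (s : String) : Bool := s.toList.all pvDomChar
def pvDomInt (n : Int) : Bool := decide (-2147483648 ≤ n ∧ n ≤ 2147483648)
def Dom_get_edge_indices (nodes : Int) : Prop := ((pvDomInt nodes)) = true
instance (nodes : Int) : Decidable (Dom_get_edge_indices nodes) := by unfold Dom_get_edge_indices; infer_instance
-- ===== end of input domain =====

-- B replaces A's quadratic list.index/slice-sum loop by one pass with a running prefix sum (objective: faster).

-- ===== PORT A =====
-- A-side helper: the loop body of A. `.getD 0` on index? is exact here: Python's
-- list.index would raise only if the element were absent, and both lookups
-- (prev and i) are elements of j, so index? always returns `some`.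
def stepA (j : List Int) (st : Int × List (Int × Int)) (i : Int) : Int × List (Int × Int) :=
  if st.1 ≠ 0 then
    (i, st.2 ++ [((PySem.List.slice j none (some (((PySem.List.index? j st.1).getD 0 : Nat) + 1 : Int))).sum,
                  (PySem.List.slice j none (some (((PySem.List.index? j i).getD 0 : Nat) + 1 : Int))).sum)])
  else
    (i, st.2 ++ [((0 : Int), (PySem.List.slice j none (some (((PySem.List.index? j i).getD 0 : Nat) + 1 : Int))).sum)])

def get_edge_indices (nodes : Int) : List (Int × Int) :=
  let j := PySem.List.pyRange 2 (nodes + 2) 1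
  (j.foldl (stepA j) ((0 : Int), ([] : List (Int × Int)))).2

-- ===== PORT B =====
def stepB (st : Int × List (Int × Int)) (k : Int) : Int × List (Int × Int) :=
  (st.1 + k, st.2 ++ [(st.1, st.1 + k)])

def get_edge_indices_alt (nodes : Int) : List (Int × Int) :=
  ((PySem.List.pyRange 2 (nodes + 2) 1).foldl stepB ((0 : Int), ([] : List (Int × Int)))).2

-- ===== PRECONDITION & SPEC =====
def Spec_get_edge_indices (nodes : Int) (out : List (Int × Int)) : Prop := out = get_edge_indices_alt nodes
instance (nodes : Int) (out : List (Int × Int)) : Decidable (Spec_get_edge_indices nodes out) := by unfold Spec_get_edge_indices; infer_instance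

-- ===== CLAIM (what is proved, stated in full; the proofs are below) =====
def Claim_equal_get_edge_indices : Prop := ∀ (nodes : Int), Dom_get_edge_indices nodes → Spec_get_edge_indices nodes (get_edge_indices nodes)

-- ===== LEMMAS AND PROOFS =====

-- prefix sums of j = [2, 3, …]
def pvS (t : Nat) : Int := ((List.range t).map (fun k : Nat => (2 : Int) + k)).sum

theorem pvS_succ (n : Nat) : pvS (n + 1) = pvS n + (2 + (n : Int)) := by
  simp [pvS, List.range_succ]

theorem pv_range_norm (nodes : Int) :
    PySem.List.pyRange 2 (nodes + 2) 1 = PySem.List.pyRange 2 (2 + ((nodes.toNat : Int))) 1 := by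
  rw [PySem.List.pyRange_one, PySem.List.pyRange_one]
  have h : (nodes + 2 - 2).toNat = (2 + ((nodes.toNat : Int)) - 2).toNat := by omega
  rw [h]

theorem pv_sum_pyRange (t : Nat) : (PySem.List.pyRange 2 (2 + (t : Int)) 1).sum = pvS t := by
  rw [PySem.List.pyRange_one]
  simp [pvS]

theorem pv_index_j (m t : Nat) (h : t < m) :
    PySem.List.index? (PySem.List.pyRange 2 (2 + (m : Int)) 1) (2 + (t : Int)) = some t := by
  rw [PySem.List.index?_eq_some_iff]
  refine ⟨PySem.List.pyRange 2 (2 + (t : Int)) 1, PySem.List.pyRange (2 + (t : Int) + 1) (2 + (m : Int)) 1, ?_, ?_, ?_⟩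
  · rw [PySem.List.pyRange_one_append 2 (2 + (t : Int)) (2 + (m : Int)) (by omega) (by omega)]
    rw [PySem.List.pyRange_one_cons (a := 2 + (t : Int)) (b := 2 + (m : Int)) (by omega)]
  · rw [PySem.List.length_pyRange_one]; omega
  · intro hmem
    have := (PySem.List.mem_pyRange_one).1 hmem
    omega

theorem pv_take_j (m t : Nat) (h : t ≤ m) :
    (PySem.List.pyRange 2 (2 + (m : Int)) 1).take t = PySem.List.pyRange 2 (2 + (t : Int)) 1 := by
  rw [PySem.List.pyRange_one_append 2 (2 + (t : Int)) (2 + (m : Int)) (by omega) (by omega)]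
  have hl : (PySem.List.pyRange 2 (2 + (t : Int)) 1).length = t := by
    rw [PySem.List.length_pyRange_one]; omega
  exact List.take_left' hl

theorem pv_slice_j (m t : Nat) (h : t < m) :
    PySem.List.slice (PySem.List.pyRange 2 (2 + (m : Int)) 1) none (some ((t : Int) + 1)) =
      PySem.List.pyRange 2 (2 + ((t + 1 : Nat) : Int)) 1 := by
  have : ((t : Int) + 1) = ((t + 1 : Nat) : Int) := by push_cast; ring
  rw [this, PySem.List.slice_to_natCast, pv_take_j m (t + 1) (by omega)]

theorem pv_A_loop (n m : Nat) (hnm : n ≤ m) :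
    (PySem.List.pyRange 2 (2 + (n : Int)) 1).foldl (stepA (PySem.List.pyRange 2 (2 + (m : Int)) 1))
        ((0 : Int), ([] : List (Int × Int))) =
      ((if n = 0 then (0 : Int) else (n : Int) + 1),
        (List.range n).map (fun t => (pvS t, pvS (t + 1)))) := by
  induction n with
  | zero => simp [PySem.List.pyRange_one_eq_nil]
  | succ n ih =>
    have hsplit : PySem.List.pyRange 2 (2 + ((n + 1 : Nat) : Int)) 1 =
        PySem.List.pyRange 2 (2 + (n : Int)) 1 ++ [2 + (n : Int)] := by
      have : (2 + ((n + 1 : Nat) : Int)) = (2 + (n : Int)) + 1 := by push_cast; ring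
      rw [this, PySem.List.pyRange_one_succ_right (by omega)]
    rw [hsplit, List.foldl_append, ih (by omega)]
    have hi : PySem.List.index? (PySem.List.pyRange 2 (2 + (m : Int)) 1) (2 + (n : Int)) = some n :=
      pv_index_j m n (by omega)
    cases n with
    | zero =>
      simp only [List.foldl_cons, List.foldl_nil, stepA, if_pos]
      rw [if_neg (by simp), hi, Option.getD_some, pv_slice_j m 0 (by omega), pv_sum_pyRange]
      simp only [Prod.mk.injEq]
      constructor
      · norm_num
      · simp [List.range_succ, pvS]
    | succ n' =>
      have hprev : PySem.List.index? (PySem.List.pyRange 2 (2 + (m : Int)) 1) ((((n' + 1 : Nat)) : Int) + 1) = some n' := by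
        have : ((((n' + 1 : Nat)) : Int) + 1) = 2 + ((n' : Nat) : Int) := by push_cast; ring
        rw [this]; exact pv_index_j m n' (by omega)
      rw [show (if n' + 1 = 0 then (0 : Int) else ((n' + 1 : Nat) : Int) + 1) =
          ((n' + 1 : Nat) : Int) + 1 from if_neg (Nat.succ_ne_zero n')]
      simp only [List.foldl_cons, List.foldl_nil, stepA]
      rw [if_pos (show ((n' + 1 : Nat) : Int) + 1 ≠ 0 by push_cast; omega)]
      rw [hprev, hi]
      simp only [Option.getD_some]
      rw [pv_slice_j m n' (by omega), pv_slice_j m (n' + 1) (by omega)]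
      rw [pv_sum_pyRange, pv_sum_pyRange]
      simp only [Prod.mk.injEq, Nat.succ_ne_zero, if_false]
      constructor
      · push_cast; ring
      · rw [List.range_succ (n := n' + 1)]
        simp

theorem pv_B_loop (n : Nat) :
    (PySem.List.pyRange 2 (2 + (n : Int)) 1).foldl stepB ((0 : Int), ([] : List (Int × Int))) =
      (pvS n, (List.range n).map (fun t => (pvS t, pvS (t + 1)))) := by
  induction n with
  | zero => simp [PySem.List.pyRange_one_eq_nil, pvS]
  | succ n ih =>
    have hsplit : PySem.List.pyRange 2 (2 + ((n + 1 : Nat) : Int)) 1 =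
        PySem.List.pyRange 2 (2 + (n : Int)) 1 ++ [2 + (n : Int)] := by
      have : (2 + ((n + 1 : Nat) : Int)) = (2 + (n : Int)) + 1 := by push_cast; ring
      rw [this, PySem.List.pyRange_one_succ_right (by omega)]
    rw [hsplit, List.foldl_append, ih]
    simp only [List.foldl_cons, List.foldl_nil, stepB]
    simp only [Prod.mk.injEq]
    refine ⟨(pvS_succ n).symm, ?_⟩
    rw [List.range_succ (n := n)]
    simp [pvS_succ]

-- ===== VERDICT (by name: the statement is the Claim_ definition above) =====
theorem get_edge_indices_spec : Claim_equal_get_edge_indices := by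
  intro nodes _
  unfold Spec_get_edge_indices
  show ((PySem.List.pyRange 2 (nodes + 2) 1).foldl
      (stepA (PySem.List.pyRange 2 (nodes + 2) 1)) ((0 : Int), ([] : List (Int × Int)))).2 =
    get_edge_indices_alt nodes
  unfold get_edge_indices_alt
  rw [pv_range_norm]
  rw [pv_A_loop nodes.toNat nodes.toNat le_rfl, pv_B_loop nodes.toNat]
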